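-- pv_equiv track=rewrite | github.com/Serdar1048/My-Python-Codes | Some Examples/Q-1.py | list_operations
-- ===== SOURCE A (Python) =====
-- def list_operations(list):
--     even_sum = 0
--     odd_sum = 0
--     for i in list:
--         if i%2==0:
--             even_sum += i
--         else:
--             odd_sum += i
--     return odd_sum - even_sum
-- ===== SOURCE B (Python) =====
-- def list_operations(list):
--     total = sum(list)
--     even_sum = sum(x for x in list if x % 2 == 0)
--     return total - 2 * even_sum
-- ===== Notes on version B (the rewrite author's own statement) =====
-- stated objective: alternative
-- what changed: Replaces the single-pass two-accumulator branch with two aggregate passes (total and even_sum) combined by the identity odd_sum - even_sum = total - 2*even_sum.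
import Mathlib
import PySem

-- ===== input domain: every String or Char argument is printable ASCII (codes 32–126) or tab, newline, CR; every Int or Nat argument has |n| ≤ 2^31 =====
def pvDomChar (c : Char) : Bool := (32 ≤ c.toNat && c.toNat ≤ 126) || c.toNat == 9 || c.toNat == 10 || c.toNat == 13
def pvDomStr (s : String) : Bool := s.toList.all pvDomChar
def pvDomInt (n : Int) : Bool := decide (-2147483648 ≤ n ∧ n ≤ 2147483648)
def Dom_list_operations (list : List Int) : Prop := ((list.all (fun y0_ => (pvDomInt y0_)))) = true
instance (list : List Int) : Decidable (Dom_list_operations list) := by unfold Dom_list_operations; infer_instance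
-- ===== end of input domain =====

-- B computes odd_sum - even_sum as total - 2*even_sum via two aggregate passes instead of A's single branched loop.


-- ===== PORT A =====
-- loop over the list keeping both accumulators, as A does
def list_operations_loop : List Int → Int → Int → Int
  | [], even_sum, odd_sum => odd_sum - even_sum
  | i :: t, even_sum, odd_sum =>
      if PySem.Int.mod i 2 == 0 then list_operations_loop t (even_sum + i) odd_sum
      else list_operations_loop t even_sum (odd_sum + i)

def list_operations (list : List Int) : Int := list_operations_loop list 0 0

-- ===== PORT B =====
def list_operations_alt (list : List Int) : Int :=
  let total := list.sum
  let even_sum := (list.filter (fun x => PySem.Int.mod x 2 == 0)).sum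
  total - 2 * even_sum

-- ===== PRECONDITION & SPEC =====
def Spec_list_operations (list : List Int) (out : Int) : Prop := out = list_operations_alt list
instance (list : List Int) (out : Int) : Decidable (Spec_list_operations list out) := by unfold Spec_list_operations; infer_instance

-- ===== CLAIM (what is proved, stated in full; the proofs are below) =====
def Claim_equal_list_operations : Prop := ∀ (list : List Int), Dom_list_operations list → Spec_list_operations list (list_operations list)

-- ===== LEMMAS AND PROOFS =====
theorem list_operations_loop_eq (l : List Int) : ∀ (e o : Int),
    list_operations_loop l e o =
      o - e + (l.sum - 2 * ((l.filter (fun x => PySem.Int.mod x 2 == 0)).sum)) := by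
  induction l with
  | nil => intro e o; simp [list_operations_loop]
  | cons i t ih =>
      intro e o
      by_cases h : (PySem.Int.mod i 2 == 0) = true
      · simp only [list_operations_loop, List.filter_cons, h, if_true, List.sum_cons, ih]; ring
      · rw [Bool.not_eq_true] at h
        simp only [list_operations_loop, List.filter_cons, h, Bool.false_eq_true, if_false, List.sum_cons, ih]; ring

-- ===== VERDICT (by name: the statement is the Claim_ definition above) =====
theorem list_operations_spec : Claim_equal_list_operations := by
  intro l _
  unfold Spec_list_operations list_operations list_operations_alt
  rw [list_operations_loop_eq]
  ring
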